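-- pv_equiv track=rewrite | github.com/jonnemi/Genotypen-in-Treponema-pallidum | dataProcess.py | assignStrains
-- ===== SOURCE A (Python) =====
-- def assignStrains(sample_names):
--     # all samples manually grouped by strain
--     group1 = ['BosniaA']
--     group2 = ['Fribourg', 'CDC2', 'GHA1', 'Gauthier', 'IND1', 'SAM1', 'SamoaD']
--     group3 = ['Seattle81', 'SEA86', 'NE20', 'BAL3', 'BAL73', 'Chicago', 'NIC1', 'NIC2', 'Dallas']
--
--     strain_labels = ['TEN', 'TPE', 'Nichols-like', 'SS14-like']
--
--     strains = []
--     for sample in sample_names: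
--         if sample in group1:
--             strain = strain_labels[0]
--         elif sample in group2:
--             strain = strain_labels[1]
--         elif sample in group3:
--             strain = strain_labels[2]
--         else:
--             strain = strain_labels[3]
--         strains.append(strain)
--     return strains
-- ===== SOURCE B (Python) =====
-- def assignStrains(sample_names):
--     # Pre-fill every position with the default label, then make one overwrite
--     # pass per strain group (groups are disjoint, so pass order is irrelevant).
--     labels = ['SS14-like'] * len(sample_names)
--     groups = [
--         ('TEN', ['BosniaA']),
--         ('TPE', ['Fribourg', 'CDC2', 'GHA1', 'Gauthier', 'IND1', 'SAM1', 'SamoaD']),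
--         ('Nichols-like', ['Seattle81', 'SEA86', 'NE20', 'BAL3', 'BAL73', 'Chicago', 'NIC1', 'NIC2', 'Dallas']),
--     ]
--     for label, group in groups:
--         members = set(group)
--         for i, s in enumerate(sample_names):
--             if s in members:
--                 labels[i] = label
--     return labels
-- ===== Notes on version B (the rewrite author's own statement) =====
-- stated objective: alternative
-- what changed: A classifies each sample once with an if/elif membership cascade appending to a result list; B pre-allocates the whole output filled with the default label and then makes three staged overwrite passes, one per strain group, relying on the groups being disjoint.
import Mathlib
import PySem

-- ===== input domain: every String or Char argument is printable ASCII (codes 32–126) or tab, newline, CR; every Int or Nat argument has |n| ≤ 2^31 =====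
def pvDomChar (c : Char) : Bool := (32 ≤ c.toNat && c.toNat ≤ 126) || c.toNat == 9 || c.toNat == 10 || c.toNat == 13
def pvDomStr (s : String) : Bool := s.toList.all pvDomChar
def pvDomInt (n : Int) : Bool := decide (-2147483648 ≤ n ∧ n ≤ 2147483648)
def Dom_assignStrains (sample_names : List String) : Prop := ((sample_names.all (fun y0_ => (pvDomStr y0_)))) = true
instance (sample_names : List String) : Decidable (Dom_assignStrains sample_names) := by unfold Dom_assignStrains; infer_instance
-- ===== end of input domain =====

-- B replaces A's per-sample if/elif cascade by a default-filled output with one overwrite pass per group (alternative decomposition, same cost class).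

-- ===== PORT A =====
-- A: per-sample if/elif cascade over three hand-written group lists, appending to a result list.
def assignStrains (sample_names : List String) : List String :=
  let group1 : List String := ["BosniaA"]
  let group2 : List String := ["Fribourg", "CDC2", "GHA1", "Gauthier", "IND1", "SAM1", "SamoaD"]
  let group3 : List String := ["Seattle81", "SEA86", "NE20", "BAL3", "BAL73", "Chicago", "NIC1", "NIC2", "Dallas"]
  let strain_labels : List String := ["TEN", "TPE", "Nichols-like", "SS14-like"]
  sample_names.foldl (fun strains sample =>
    let strain :=
      if group1.contains sample then strain_labels[0]!
      else if group2.contains sample then strain_labels[1]!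
      else if group3.contains sample then strain_labels[2]!
      else strain_labels[3]!
    strains ++ [strain]) []

-- ===== PORT B =====
-- B: output pre-filled with the default label; one overwrite pass per (label, group) pair.
def pvGroups : List (String × PySem.Set String) :=
  [("TEN", PySem.Set.ofList ["BosniaA"]),
   ("TPE", PySem.Set.ofList ["Fribourg", "CDC2", "GHA1", "Gauthier", "IND1", "SAM1", "SamoaD"]),
   ("Nichols-like", PySem.Set.ofList ["Seattle81", "SEA86", "NE20", "BAL3", "BAL73", "Chicago", "NIC1", "NIC2", "Dallas"])]

def assignStrains_alt (sample_names : List String) : List String :=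
  let labels := sample_names.map (fun _ => "SS14-like")
  pvGroups.foldl (fun labels p =>
    (labels.zip sample_names).map (fun q => if p.2.contains q.2 then p.1 else q.1)) labels

-- ===== PRECONDITION & SPEC =====
def Spec_assignStrains (sample_names : List String) (out : List String) : Prop := out = assignStrains_alt sample_names
instance (sample_names : List String) (out : List String) : Decidable (Spec_assignStrains sample_names out) := by unfold Spec_assignStrains; infer_instance

-- ===== CLAIM =====
def Claim_equal_assignStrains : Prop := ∀ (sample_names : List String), Dom_assignStrains sample_names → Spec_assignStrains sample_names (assignStrains sample_names)

-- ===== LEMMAS AND PROOFS =====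

-- one overwrite pass over labels given as a map of sample_names is again a map
theorem pv_pass (g : String → String) (f : String → Bool) (lab : String) (ns : List String) :
    ((ns.map g).zip ns).map (fun q => if f q.2 then lab else q.1)
      = ns.map (fun s => if f s then lab else g s) := by
  induction ns with
  | nil => rfl
  | cons a t ih => simp only [List.map_cons, List.zip_cons_cons, ih]

-- pointwise: the three staged overwrites agree with A's branch cascade for every sample name
theorem pv_point (s : String) :
    (if (["BosniaA"] : List String).contains s then "TEN"
     else if (["Fribourg", "CDC2", "GHA1", "Gauthier", "IND1", "SAM1", "SamoaD"] : List String).contains s then "TPE"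
     else if (["Seattle81", "SEA86", "NE20", "BAL3", "BAL73", "Chicago", "NIC1", "NIC2", "Dallas"] : List String).contains s then "Nichols-like"
     else "SS14-like")
    = (if (pvGroups[2]!.2).contains s then "Nichols-like"
       else if (pvGroups[1]!.2).contains s then "TPE"
       else if (pvGroups[0]!.2).contains s then "TEN"
       else "SS14-like") := by
  by_cases h1 : s = "BosniaA"; · subst h1; decide
  by_cases h2 : s = "Fribourg"; · subst h2; decide
  by_cases h3 : s = "CDC2"; · subst h3; decide
  by_cases h4 : s = "GHA1"; · subst h4; decide
  by_cases h5 : s = "Gauthier"; · subst h5; decide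
  by_cases h6 : s = "IND1"; · subst h6; decide
  by_cases h7 : s = "SAM1"; · subst h7; decide
  by_cases h8 : s = "SamoaD"; · subst h8; decide
  by_cases h9 : s = "Seattle81"; · subst h9; decide
  by_cases h10 : s = "SEA86"; · subst h10; decide
  by_cases h11 : s = "NE20"; · subst h11; decide
  by_cases h12 : s = "BAL3"; · subst h12; decide
  by_cases h13 : s = "BAL73"; · subst h13; decide
  by_cases h14 : s = "Chicago"; · subst h14; decide
  by_cases h15 : s = "NIC1"; · subst h15; decide
  by_cases h16 : s = "NIC2"; · subst h16; decide
  by_cases h17 : s = "Dallas"; · subst h17; decide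
  simp [pvGroups, PySem.Set.ofList, PySem.Set.contains, List.contains_eq_mem,
    h1, h2, h3, h4, h5, h6, h7, h8, h9, h10, h11, h12, h13, h14, h15, h16, h17]

-- ===== VERDICT =====
theorem assignStrains_spec : Claim_equal_assignStrains := by
  intro ns _
  unfold Spec_assignStrains assignStrains assignStrains_alt
  rw [PySem.List.foldl_append_singleton_eq_map]
  simp only [pvGroups, List.foldl_cons, List.foldl_nil, pv_pass]
  refine List.map_congr_left (fun s _ => ?_)
  have := pv_point s
  simpa [pvGroups] using this
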